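-- pv_equiv track=rewrite | github.com/rajrkane/elgamal-elliptic | Elgamal.py | blocksToNumbers
-- ===== SOURCE A (Python) =====
-- def blocksToNumbers(blockList):
--     """Converts a list of text blocks into a list of numbers."""
--     numbers = []
--     for block in blockList:
--         N = 0
--         encodedBlock = list(block.encode('ascii'))
--         for i in range(len(block)):
--             N += encodedBlock[i] * (256 ** i)
--         numbers.append(N)
--     return numbers
-- ===== SOURCE B (Python) =====
-- def _blockValue(block):
--     N = 0
--     for ch in reversed(block):
--         N = N * 256 + ord(ch)
--     return N
--
-- def blocksToNumbers(blockList):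
--     """Converts a list of text blocks into a list of numbers."""
--     return [_blockValue(block) for block in blockList]
-- ===== Notes on version B (the rewrite author's own statement) =====
-- stated objective: faster
-- what changed: Replaces the per-index sum with a fresh 256**i power at every step by a single Horner accumulation (N = N*256 + byte) over the reversed block, mapped over the list.
import Mathlib
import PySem

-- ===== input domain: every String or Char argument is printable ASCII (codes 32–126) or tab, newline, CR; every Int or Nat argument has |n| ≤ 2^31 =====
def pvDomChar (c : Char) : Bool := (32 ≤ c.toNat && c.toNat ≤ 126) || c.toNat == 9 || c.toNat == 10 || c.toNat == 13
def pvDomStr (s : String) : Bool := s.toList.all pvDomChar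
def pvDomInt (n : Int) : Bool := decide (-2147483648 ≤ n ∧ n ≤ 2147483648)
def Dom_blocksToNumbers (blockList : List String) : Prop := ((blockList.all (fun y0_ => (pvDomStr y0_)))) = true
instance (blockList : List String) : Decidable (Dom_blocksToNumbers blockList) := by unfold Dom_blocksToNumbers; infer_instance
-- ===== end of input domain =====

-- B replaces A's fresh 256**i power at every index by one Horner pass (N = N*256 + byte)
-- over the reversed block: O(n) bignum multiply-adds per block instead of A's O(n^2).
-- On Dom (ASCII-only strings) block.encode('ascii') never raises, so A is total: no Pre_.

-- ===== PORT A =====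
def blocksToNumbers (blockList : List String) : List Int :=
  blockList.foldl (fun numbers block =>
    let encodedBlock : List Int := block.toList.map (fun c => (c.toNat : Int))
    let N : Int := (PySem.List.pyRange 0 (PySem.Str.len block) 1).foldl
      (fun N i => N + PySem.List.pyGetD encodedBlock i 0 * 256 ^ i.toNat) 0
    numbers ++ [N]) []

-- ===== PORT B =====
def blockValue (block : String) : Int :=
  block.toList.reverse.foldl (fun N c => N * 256 + (c.toNat : Int)) 0

def blocksToNumbers_alt (blockList : List String) : List Int :=
  blockList.map blockValue

-- ===== PRECONDITION & SPEC =====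
def Spec_blocksToNumbers (blockList : List String) (out : List Int) : Prop := out = blocksToNumbers_alt blockList
instance (blockList : List String) (out : List Int) : Decidable (Spec_blocksToNumbers blockList out) := by unfold Spec_blocksToNumbers; infer_instance

-- ===== CLAIM (what is proved, stated in full; the proofs are below) =====
def Claim_equal_blocksToNumbers : Prop := ∀ (blockList : List String), Dom_blocksToNumbers blockList → Spec_blocksToNumbers blockList (blocksToNumbers blockList)

-- ===== LEMMAS AND PROOFS =====

-- B's Horner fold over the reverse, as a foldr ("little-endian value" of a byte list).
def tailValue (xs : List Int) : Int := xs.foldr (fun c N => N * 256 + c) 0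

theorem tailValue_cons (c : Int) (xs : List Int) :
    tailValue (c :: xs) = tailValue xs * 256 + c := rfl

theorem blockValue_eq (block : String) :
    blockValue block = tailValue (block.toList.map (fun c => (c.toNat : Int))) := by
  unfold blockValue tailValue
  rw [List.foldl_reverse]
  induction block.toList with
  | nil => rfl
  | cons c cs ih => simp [List.foldr, ih]

-- A's indexed sum from position k onward equals 256^k times the tail's value.
theorem foldA_eq (enc : List Int) (k : Int) (hk : 0 ≤ k) (init : Int) :
    (PySem.List.pyRange k (enc.length : Int) 1).foldl
      (fun N i => N + PySem.List.pyGetD enc i 0 * 256 ^ i.toNat) init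
    = init + 256 ^ k.toNat * tailValue (enc.drop k.toNat) := by
  by_cases h : k < (enc.length : Int)
  · rw [PySem.List.pyRange_one_cons h, List.foldl_cons]
    have hlt : k.toNat < enc.length := by omega
    have hdrop : enc.drop k.toNat = enc[k.toNat] :: enc.drop (k.toNat + 1) :=
      List.drop_eq_getElem_cons hlt
    rw [foldA_eq enc (k + 1) (by omega)]
    rw [PySem.List.pyGetD_eq_getElem enc 0 hk h]
    have h1 : (k + 1).toNat = k.toNat + 1 := by omega
    rw [h1, hdrop, tailValue_cons]
    ring
  · rw [PySem.List.pyRange_one_eq_nil (by omega)]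
    have hdrop : enc.drop k.toNat = [] := List.drop_eq_nil_of_le (by omega)
    simp [hdrop, tailValue]
termination_by ((enc.length : Int) - k).toNat
decreasing_by omega

theorem perBlock (block : String) :
    (PySem.List.pyRange 0 (PySem.Str.len block) 1).foldl
      (fun N i => N + PySem.List.pyGetD (block.toList.map (fun c => (c.toNat : Int))) i 0 * 256 ^ i.toNat) 0
    = blockValue block := by
  have hlen : PySem.Str.len block = ((block.toList.map (fun c => (c.toNat : Int))).length : Int) := by
    simp [PySem.Str.len]
  rw [hlen, foldA_eq _ 0 le_rfl 0, blockValue_eq]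
  simp

theorem main_eq (blockList : List String) :
    blocksToNumbers blockList = blocksToNumbers_alt blockList := by
  unfold blocksToNumbers blocksToNumbers_alt
  induction blockList using List.reverseRecOn with
  | nil => rfl
  | append_singleton xs x ih =>
    rw [List.foldl_append, List.map_append, ih, List.foldl_cons, List.foldl_nil]
    simpa using perBlock x

-- ===== VERDICT (by name: the statement is the Claim_ definition above) =====
theorem blocksToNumbers_spec : Claim_equal_blocksToNumbers := by
  intro blockList _
  exact main_eq blockList
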